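-- pv_equiv track=rewrite | github.com/Origamologo/Analisis-civitatis-Barcelona | src/limpieza.py | dict_civitatis_5
-- ===== SOURCE A (Python) =====
-- def dict_civitatis_5(lista):
--     """
--     It creates a dicctionary with the desired information for each review with
--     its five keys fullfilled, so we can create a data frame from it.
--     Arg:
--         lista (list): the list of lists containing the cleanned reviews with
--     its five keys fullfilled
--     Returns:
--         A dictionary containing the elements of each review with
--         its five keys fullfilled
--     """
--     dict_revius = {'fecha' : [],
--                'nombre' : [],
--                'procedencia' : [],
--                'opinion' : [],
--                'viajo_con' : []}
--     for reviu in lista: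
--         if len(reviu)==5:
--             dict_revius['fecha'].append(reviu[0])
--             dict_revius['nombre'].append(reviu[1])
--             dict_revius['procedencia'].append(reviu[2])
--             dict_revius['opinion'].append(reviu[3])
--             dict_revius['viajo_con'].append(reviu[4])
--     return dict_revius
-- ===== SOURCE B (Python) =====
-- def dict_civitatis_5(lista):
--     filtered = [r for r in lista if len(r) == 5]
--     if not filtered:
--         return {'fecha': [], 'nombre': [], 'procedencia': [],
--                 'opinion': [], 'viajo_con': []}
--     cols = list(zip(*filtered))
--     return {'fecha': list(cols[0]),
--             'nombre': list(cols[1]),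
--             'procedencia': list(cols[2]),
--             'opinion': list(cols[3]),
--             'viajo_con': list(cols[4])}
-- ===== Notes on version B (the rewrite author's own statement) =====
-- stated objective: idiomatic
-- what changed: B filters the 5-field rows once and transposes them with zip(*...) into the five columns, instead of A's row loop that appends field-by-field into a pre-built dict.
import Mathlib
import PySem

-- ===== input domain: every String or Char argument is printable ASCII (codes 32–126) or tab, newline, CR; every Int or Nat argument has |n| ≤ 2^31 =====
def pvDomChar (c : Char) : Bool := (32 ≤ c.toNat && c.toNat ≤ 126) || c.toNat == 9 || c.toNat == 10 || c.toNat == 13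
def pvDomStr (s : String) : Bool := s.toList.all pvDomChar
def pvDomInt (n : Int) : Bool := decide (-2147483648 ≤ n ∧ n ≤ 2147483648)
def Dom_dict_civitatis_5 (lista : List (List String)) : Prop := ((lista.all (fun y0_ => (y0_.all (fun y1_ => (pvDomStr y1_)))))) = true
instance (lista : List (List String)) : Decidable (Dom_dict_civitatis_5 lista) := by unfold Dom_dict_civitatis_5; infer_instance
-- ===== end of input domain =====

-- B filters the 5-field rows once and transposes them into the five columns (zip(*...)),
-- instead of A's row loop appending field-by-field into a pre-built dict; idiomatic, same cost.


-- ===== PORT A =====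
-- A's dict has five fixed literal keys; it is carried as the five lists (one per key),
-- the loop appends reviu[0..4] to them exactly as the Python mutates dict_revius.
def dict_civitatis_5 (lista : List (List String)) : List (String × List String) :=
  let st := lista.foldl
    (fun (st : List String × List String × List String × List String × List String) reviu =>
      if reviu.length = 5 then
        (st.1 ++ [PySem.List.pyGetD reviu 0 ""],
         st.2.1 ++ [PySem.List.pyGetD reviu 1 ""],
         st.2.2.1 ++ [PySem.List.pyGetD reviu 2 ""],
         st.2.2.2.1 ++ [PySem.List.pyGetD reviu 3 ""],
         st.2.2.2.2 ++ [PySem.List.pyGetD reviu 4 ""])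
      else st)
    ([], [], [], [], [])
  [("fecha", st.1), ("nombre", st.2.1), ("procedencia", st.2.2.1),
   ("opinion", st.2.2.2.1), ("viajo_con", st.2.2.2.2)]

-- ===== PORT B =====
-- Source B: filter the 5-field rows, special-case empty, else transpose; column i of the
-- transpose zip(*filtered) is filtered.map (·[i]).
def dict_civitatis_5_alt (lista : List (List String)) : List (String × List String) :=
  let filtered := lista.filter (fun r => r.length == 5)
  if filtered = [] then
    [("fecha", []), ("nombre", []), ("procedencia", []), ("opinion", []), ("viajo_con", [])]
  else
    [("fecha", filtered.map (fun r => PySem.List.pyGetD r 0 "")),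
     ("nombre", filtered.map (fun r => PySem.List.pyGetD r 1 "")),
     ("procedencia", filtered.map (fun r => PySem.List.pyGetD r 2 "")),
     ("opinion", filtered.map (fun r => PySem.List.pyGetD r 3 "")),
     ("viajo_con", filtered.map (fun r => PySem.List.pyGetD r 4 ""))]

-- ===== PRECONDITION & SPEC =====
def Spec_dict_civitatis_5 (lista : List (List String)) (out : List (String × List String)) : Prop := out = dict_civitatis_5_alt lista
instance (lista : List (List String)) (out : List (String × List String)) : Decidable (Spec_dict_civitatis_5 lista out) := by unfold Spec_dict_civitatis_5; infer_instance

-- ===== CLAIM (what is proved, stated in full; the proofs are below) =====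
def Claim_equal_dict_civitatis_5 : Prop := ∀ (lista : List (List String)), Dom_dict_civitatis_5 lista → Spec_dict_civitatis_5 lista (dict_civitatis_5 lista)

-- ===== LEMMAS AND PROOFS =====

-- The loop state after folding over `lista`, started from any accumulator, appends
-- exactly the five columns of the filtered rows.
theorem dict_civitatis_5_fold (lista : List (List String))
    (f n p o v : List String) :
    lista.foldl
      (fun (st : List String × List String × List String × List String × List String) reviu =>
        if reviu.length = 5 then
          (st.1 ++ [PySem.List.pyGetD reviu 0 ""],
           st.2.1 ++ [PySem.List.pyGetD reviu 1 ""],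
           st.2.2.1 ++ [PySem.List.pyGetD reviu 2 ""],
           st.2.2.2.1 ++ [PySem.List.pyGetD reviu 3 ""],
           st.2.2.2.2 ++ [PySem.List.pyGetD reviu 4 ""])
        else st)
      (f, n, p, o, v)
    = (f ++ (lista.filter (fun r => r.length == 5)).map (fun r => PySem.List.pyGetD r 0 ""),
       n ++ (lista.filter (fun r => r.length == 5)).map (fun r => PySem.List.pyGetD r 1 ""),
       p ++ (lista.filter (fun r => r.length == 5)).map (fun r => PySem.List.pyGetD r 2 ""),
       o ++ (lista.filter (fun r => r.length == 5)).map (fun r => PySem.List.pyGetD r 3 ""),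
       v ++ (lista.filter (fun r => r.length == 5)).map (fun r => PySem.List.pyGetD r 4 "")) := by
  induction lista generalizing f n p o v with
  | nil => simp
  | cons x xs ih =>
    by_cases hx : x.length = 5 <;>
      simp [List.foldl_cons, hx, ih]

-- ===== VERDICT (by name: the statement is the Claim_ definition above) =====
theorem dict_civitatis_5_spec : Claim_equal_dict_civitatis_5 := by
  intro lista _
  unfold Spec_dict_civitatis_5 dict_civitatis_5 dict_civitatis_5_alt
  rw [dict_civitatis_5_fold]
  by_cases h : lista.filter (fun r => r.length == 5) = [] <;> simp [h]
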